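-- pv_equiv track=rewrite | github.com/Angel5112/Learning_To_Code | Python/Guias/Problemario1_Estructuras_Control/random_dice_value.py | dice_combination
-- ===== SOURCE A (Python) =====
-- def dice_combination(n: int) -> set:
--
--     combinations = set()
--     aux_list = []
--
--     for i in range(1, 7):
--         for j in range(1, 7):
--             if i + j == n:
--                 aux_list.append(i)
--                 aux_list.append(j)
--                 aux_list.sort()
--                 combinations.add(tuple(aux_list))
--                 aux_list.clear()
--
--     return combinations
-- ===== SOURCE B (Python) =====
-- def dice_combination(n: int) -> set:
--     lo = max(1, n - 6)
--     hi = n // 2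
--     return {(i, n - i) for i in range(lo, hi + 1)}
-- ===== Notes on version B (the rewrite author's own statement) =====
-- stated objective: alternative
-- what changed: Closed-form range: the valid sorted pairs are exactly (i, n-i) for i from max(1, n-6) up to half of n, so B enumerates them directly with no nested scan, no per-hit sorting and no membership tests.
import Mathlib
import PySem

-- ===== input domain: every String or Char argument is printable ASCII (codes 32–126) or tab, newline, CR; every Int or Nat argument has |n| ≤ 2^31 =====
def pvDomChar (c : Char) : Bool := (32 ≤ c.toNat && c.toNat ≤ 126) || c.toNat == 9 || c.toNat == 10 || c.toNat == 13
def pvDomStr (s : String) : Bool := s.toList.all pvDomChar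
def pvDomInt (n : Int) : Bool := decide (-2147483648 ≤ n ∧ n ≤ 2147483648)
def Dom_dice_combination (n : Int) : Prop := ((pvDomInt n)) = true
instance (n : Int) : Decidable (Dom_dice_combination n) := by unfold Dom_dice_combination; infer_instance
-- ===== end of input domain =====

-- B enumerates the sorted pairs directly as (i, n-i) for i in the closed-form
-- range max(1, n-6) .. n//2, replacing A's nested 6x6 scan with per-hit sort.


-- ===== PORT A =====
-- 'aux_list' gets [i, j], is sorted (a two-element sort is the min/max pair),
-- tuple(aux_list) is the pair, then it is cleared: each iteration contributes
-- the sorted pair independently.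
def dice_combination (n : Int) : PySem.Set (Int × Int) :=
  (PySem.List.pyRange 1 7 1).foldl (fun acc i =>
    (PySem.List.pyRange 1 7 1).foldl (fun acc2 j =>
      if i + j = n then
        PySem.Set.add acc2 (if i ≤ j then (i, j) else (j, i))
      else acc2) acc) PySem.Set.empty

-- ===== PORT B =====
-- {(i, n - i) for i in range(max(1, n-6), n // 2 + 1)}
def dice_combination_alt (n : Int) : PySem.Set (Int × Int) :=
  (PySem.List.pyRange (max 1 (n - 6)) (PySem.Int.floordiv n 2 + 1) 1).foldl
    (fun acc i => PySem.Set.add acc (i, n - i)) PySem.Set.empty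

-- ===== PRECONDITION & SPEC =====
def Spec_dice_combination (n : Int) (out : List (Int × Int)) : Prop := out = dice_combination_alt n
instance (n : Int) (out : List (Int × Int)) : Decidable (Spec_dice_combination n out) := by unfold Spec_dice_combination; infer_instance

-- ===== CLAIM =====
def Claim_equal_dice_combination : Prop := ∀ (n : Int), Dom_dice_combination n → Spec_dice_combination n (dice_combination n)

-- ===== LEMMAS AND PROOFS =====

-- A fold whose step leaves the accumulator unchanged on every list element is the identity.
theorem foldl_id_of_mem {a b : Type} (l : List b) (f : a -> b -> a)
    (h : forall x, x ∈ l -> forall acc, f acc x = acc) (acc : a) : l.foldl f acc = acc := by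
  induction l generalizing acc with
  | nil => rfl
  | cons y t ih =>
      rw [List.foldl_cons, h y (by simp)]
      exact ih (fun x hx acc => h x (by simp [hx]) acc) acc

-- Outside 2 ≤ n ≤ 12 no pair of dice faces sums to n: A's folds add nothing
-- and B's range is empty.
theorem dice_combination_empty_of_out (n : Int) (h : ¬ (2 ≤ n ∧ n ≤ 12)) :
    dice_combination n = [] ∧ dice_combination_alt n = [] := by
  constructor
  · unfold dice_combination
    refine foldl_id_of_mem _ _ (fun i hi acc => ?_) _
    refine foldl_id_of_mem _ _ (fun j hj acc2 => ?_) _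
    have hi' := (PySem.List.mem_pyRange_one).1 hi
    have hj' := (PySem.List.mem_pyRange_one).1 hj
    rw [if_neg (by omega)]
  · unfold dice_combination_alt
    rw [PySem.List.pyRange_one_eq_nil (by
      rw [PySem.Int.floordiv_eq_ediv_of_pos (by norm_num)]
      omega)]
    rfl
-- ===== VERDICT =====
theorem dice_combination_spec : Claim_equal_dice_combination := by
  intro n _
  unfold Spec_dice_combination
  by_cases h : 2 ≤ n ∧ n ≤ 12
  · obtain ⟨h1, h2⟩ := h
    interval_cases n <;> decide
  · obtain ⟨ha, hb⟩ := dice_combination_empty_of_out n h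
    rw [ha, hb]
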